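-- pv_equiv track=rewrite | github.com/MinHyukSeok/Algorithm_Solved | 백준/Silver/4659. 비밀번호 발음하기/비밀번호 발음하기.py | second_check
-- ===== SOURCE A (Python) =====
-- def first_check(fs):              # 모음 검사
--     if 'a' in fs:
--         return True
--     elif 'e' in fs:
--         return True
--     elif 'i' in fs:
--         return True
--     elif 'o' in fs:
--         return True
--     elif 'u' in fs:
--         return True
--     else:
--         return False
--
-- def second_check(fs):
--     if len(fs) <= 2:
--         return True
--
--     fs = list(fs)
--     temp = []
--     temp.append(fs.pop(0))
--     temp.append(fs.pop(0))
--
--     while fs: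
--         temp.append(fs.pop(0))
--
--         if first_check(temp[0]) == True and first_check(temp[1]) == True and first_check(temp[2]) == True:
--             return False
--         elif first_check(temp[0]) == False and first_check(temp[1]) == False and first_check(temp[2]) == False:
--             return False
--         else:
--             temp.pop(0)
--     return True
-- ===== SOURCE B (Python) =====
-- def second_check(fs):
--     # run-length encode the vowel/consonant mask, then require every run < 3
--     mask = [c in 'aeiou' for c in fs]
--     runs = []
--     for v in mask:
--         if runs and runs[-1][0] == v:
--             runs[-1][1] += 1
--         else:
--             runs.append([v, 1])
--     return all(n < 3 for _, n in runs)
-- ===== Notes on version B (the rewrite author's own statement) =====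
-- stated objective: idiomatic
-- what changed: A slides a 3-window over the string popping from the front and re-classifying each window; B builds the vowel/consonant mask once, run-length encodes it in one pass (list of [value,count] runs), and checks that every run has length < 3.
import Mathlib
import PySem

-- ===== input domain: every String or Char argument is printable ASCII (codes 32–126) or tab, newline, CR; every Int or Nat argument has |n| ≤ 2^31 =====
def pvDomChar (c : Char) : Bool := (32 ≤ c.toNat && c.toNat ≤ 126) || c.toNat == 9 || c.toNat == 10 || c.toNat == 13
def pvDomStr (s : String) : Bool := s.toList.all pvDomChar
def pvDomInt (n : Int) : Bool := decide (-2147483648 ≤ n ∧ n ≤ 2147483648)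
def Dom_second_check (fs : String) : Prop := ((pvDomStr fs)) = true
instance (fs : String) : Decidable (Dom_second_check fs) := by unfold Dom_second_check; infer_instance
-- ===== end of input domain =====

-- B replaces A's quadratic pop-from-front 3-window re-check with a one-pass
-- run-length encoding of the vowel/consonant mask checked for a run ≥ 3 (idiomatic decomposition).

-- ===== PORT A =====
-- first_check: 'a' in fs / … ; A only calls it on the single characters temp[i]
def first_check_A (fs : List Char) : Bool :=
  if fs.contains 'a' then true
  else if fs.contains 'e' then true
  else if fs.contains 'i' then true
  else if fs.contains 'o' then true
  else if fs.contains 'u' then true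
  else false

-- the while loop: temp = [t0, t1], pop the next char, test the 3-window, slide
def second_check_loop (t0 t1 : Char) : List Char → Bool
  | [] => true
  | c :: rest =>
    if first_check_A [t0] = true ∧ first_check_A [t1] = true ∧ first_check_A [c] = true then
      false
    else if first_check_A [t0] = false ∧ first_check_A [t1] = false ∧ first_check_A [c] = false then
      false
    else
      second_check_loop t1 c rest

def second_check (fs : String) : Bool :=
  if fs.length ≤ 2 then true
  else
    match fs.toList with
    | a :: b :: rest => second_check_loop a b rest
    | _ => true

-- ===== PORT B =====
-- c in 'aeiou'
def isVowelB (c : Char) : Bool := (['a', 'e', 'i', 'o', 'u'] : List Char).contains c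

-- the body of B's for-loop: extend runs[-1] if the class matches, else open a new run
def addRunB (runs : List (Bool × Int)) (v : Bool) : List (Bool × Int) :=
  match runs.getLast? with
  | some (u, n) => if u = v then runs.dropLast ++ [(u, n + 1)] else runs ++ [(v, 1)]
  | none => [(v, 1)]

def second_check_alt (fs : String) : Bool :=
  let mask := fs.toList.map isVowelB
  let runs := mask.foldl addRunB []
  runs.all (fun p => p.2 < 3)

-- ===== PRECONDITION & SPEC =====
def Spec_second_check (fs : String) (out : Bool) : Prop := out = second_check_alt fs
instance (fs : String) (out : Bool) : Decidable (Spec_second_check fs out) := by unfold Spec_second_check; infer_instance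

-- ===== CLAIM (what is proved, stated in full; the proofs are below) =====
def Claim_equal_second_check : Prop := ∀ (fs : String), Dom_second_check fs → Spec_second_check fs (second_check fs)

-- ===== LEMMAS AND PROOFS =====

theorem first_check_single (c : Char) : first_check_A [c] = isVowelB c := by
  by_cases ha : c = 'a'
  · subst ha; decide
  by_cases he : c = 'e'
  · subst he; decide
  by_cases hi : c = 'i'
  · subst hi; decide
  by_cases ho : c = 'o'
  · subst ho; decide
  by_cases hu : c = 'u'
  · subst hu; decide
  unfold first_check_A isVowelB
  simp only [List.contains_cons, List.contains_nil, Bool.or_false, beq_iff_eq]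
  rw [if_neg (fun h => ha h.symm), if_neg (fun h => he h.symm), if_neg (fun h => hi h.symm),
      if_neg (fun h => ho h.symm), if_neg (fun h => hu h.symm)]
  simp [ha, he, hi, ho, hu]

theorem addRunB_concat (init : List (Bool × Int)) (x : Bool × Int) (v : Bool) :
    addRunB (init ++ [x]) v = init ++ addRunB [x] v := by
  obtain ⟨u, n⟩ := x
  simp [addRunB]
  split <;> simp

theorem foldl_addRunB_concat (l : List Bool) (init : List (Bool × Int)) (x : Bool × Int) :
    List.foldl addRunB (init ++ [x]) l = init ++ List.foldl addRunB [x] l := by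
  induction l generalizing init x with
  | nil => simp
  | cons v l ih =>
    obtain ⟨u, n⟩ := x
    simp only [List.foldl_cons, addRunB_concat]
    by_cases h : u = v
    · subst h
      have hv : addRunB [(u, n)] u = [(u, n + 1)] := by simp [addRunB]
      rw [hv]
      exact ih init (u, n + 1)
    · have hv : addRunB [(u, n)] v = [(u, n)] ++ [(v, 1)] := by simp [addRunB, h]
      rw [hv, ← List.append_assoc, ih (init ++ [(u, n)]) (v, 1), ih [(u, n)] (v, 1)]
      simp

-- the state of B's scan after some prefix: current run (u, n), remaining mask l
def runScan (u : Bool) (n : Int) (l : List Bool) : Bool :=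
  (List.foldl addRunB [(u, n)] l).all (fun p => p.2 < 3)

theorem runScan_nil (u : Bool) (n : Int) : runScan u n [] = decide (n < 3) := by
  simp [runScan, List.all]

theorem runScan_cons (u : Bool) (n : Int) (v : Bool) (l : List Bool) :
    runScan u n (v :: l) =
      if u = v then runScan u (n + 1) l else (decide (n < 3) && runScan v 1 l) := by
  by_cases h : u = v
  · simp [runScan, addRunB, h]
  · have h1 : addRunB [(u, n)] v = [(u, n)] ++ [(v, 1)] := by simp [addRunB, h]
    simp only [runScan, List.foldl_cons, h1, foldl_addRunB_concat, List.all_append, if_neg h]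
    simp

theorem runScan_big (l : List Bool) (u : Bool) (n : Int) (hn : 3 ≤ n) : runScan u n l = false := by
  induction l generalizing u n with
  | nil => simp [runScan_nil]; omega
  | cons v l ih =>
    rw [runScan_cons]
    by_cases h : u = v
    · simp [h, ih v (n + 1) (by omega)]
    · simp [h]
      intro hlt
      omega

theorem loop_eq_runScan (rest : List Char) (t0 t1 : Char) :
    second_check_loop t0 t1 rest =
      runScan (isVowelB t1) (if isVowelB t0 = isVowelB t1 then 2 else 1)
        (rest.map isVowelB) := by
  induction rest generalizing t0 t1 with
  | nil =>
    by_cases h : isVowelB t0 = isVowelB t1 <;> simp [second_check_loop, h, runScan_nil]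
  | cons c rest ih =>
    simp only [second_check_loop, List.map_cons, first_check_single]
    cases h0 : isVowelB t0 <;> cases h1 : isVowelB t1 <;> cases hc : isVowelB c <;>
      simp only [runScan_cons, if_true] <;>
      simp [ih, h1, hc, runScan_big]

theorem toList_length (s : String) : s.length = s.toList.length := rfl

theorem alt_eq (a b : Char) (rest : List Char) (h : (a :: b :: rest : List Char) = fs.toList) :
    second_check_alt fs = second_check_loop a b rest := by
  rw [loop_eq_runScan]
  simp only [second_check_alt, ← h, List.map_cons, List.foldl_cons]
  have h1 : addRunB [] (isVowelB a) = [(isVowelB a, 1)] := by simp [addRunB]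
  rw [h1]
  by_cases hab : isVowelB a = isVowelB b
  · have : addRunB [(isVowelB a, 1)] (isVowelB b) = [(isVowelB a, (2 : Int))] := by
      simp [addRunB, hab]
    rw [this, if_pos hab, hab]
    rfl
  · have : addRunB [(isVowelB a, 1)] (isVowelB b) = [(isVowelB a, (1 : Int))] ++ [(isVowelB b, 1)] := by
      simp [addRunB, hab]
    rw [this, foldl_addRunB_concat, if_neg hab]
    simp [runScan]

-- ===== VERDICT (by name: the statement is the Claim_ definition above) =====
theorem second_check_spec : Claim_equal_second_check := by
  intro fs _
  unfold Spec_second_check second_check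
  by_cases hlen : fs.length ≤ 2
  · rw [if_pos hlen]
    rw [toList_length] at hlen
    match hls : fs.toList with
    | [] => simp [second_check_alt, hls]
    | [a] => simp [second_check_alt, hls, addRunB]
    | [a, b] =>
      by_cases hab : isVowelB a = isVowelB b <;>
        simp [second_check_alt, hls, addRunB, hab]
    | a :: b :: c :: l => rw [hls] at hlen; simp at hlen
  · rw [if_neg hlen]
    rw [toList_length] at hlen
    match hls : fs.toList with
    | [] => rw [hls] at hlen; simp at hlen
    | [a] => rw [hls] at hlen; simp at hlen
    | a :: b :: rest => exact (alt_eq a b rest hls.symm).symm
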